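-- pv_equiv track=rewrite | github.com/PanchajanyaMysarla/python | pythonds/practise.py | helper
-- ===== SOURCE A (Python) =====
-- def helper(start,s):
--     seen = set()
--     for i in range(start,len(s)):
--         if s[i] not in seen:
--             seen.add(s[i])
--         else:
--             return i- start
--     return len(s) - start
-- ===== SOURCE B (Python) =====
-- def helper(start, s):
--     # Per-character strategy: the first repeat position equals the minimum, over
--     # characters occurring at least twice in the scanned sequence, of the index
--     # of that character's second occurrence.
--     t = [s[i] for i in range(start, len(s))]
--     best = len(s) - start
--     for c in set(t):
--         if t.count(c) > 1:
--             j = t.index(c)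
--             best = min(best, j + 1 + t[j + 1:].index(c))
--     return best
-- ===== Notes on version B (the rewrite author's own statement) =====
-- stated objective: alternative
-- what changed: B abandons A's sequential scan with a maintained seen-set and early return: it computes, for each distinct character of the scanned sequence that occurs at least twice, the index of its second occurrence (via count/index passes), and returns the minimum of those indices (default len(s)-start); correctness: the first repeat position is exactly that minimum.
import Mathlib
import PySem

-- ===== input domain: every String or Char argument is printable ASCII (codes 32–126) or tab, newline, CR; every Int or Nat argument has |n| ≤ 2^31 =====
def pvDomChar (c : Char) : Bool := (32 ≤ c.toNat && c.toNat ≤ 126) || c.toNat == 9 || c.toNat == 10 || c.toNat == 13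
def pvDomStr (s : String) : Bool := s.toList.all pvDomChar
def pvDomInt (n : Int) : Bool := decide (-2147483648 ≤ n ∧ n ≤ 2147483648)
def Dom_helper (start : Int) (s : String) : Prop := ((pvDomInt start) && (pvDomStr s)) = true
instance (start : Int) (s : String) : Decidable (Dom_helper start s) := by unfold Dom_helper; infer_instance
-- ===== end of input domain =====

-- B replaces A's single sequential scan (seen-set, early return) by a per-character
-- computation: the minimum, over characters occurring twice, of the second-occurrence
-- index (alternative algorithm; not faster).

-- ===== PORT A =====
-- the for-loop of A: state = the `seen` set; early return on a repeated char
def helperALoop (cs : List Char) (start : Int) : List Int → PySem.Set Char → Int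
  | [], _ => (cs.length : Int) - start
  | i :: rest, seen =>
    let c := (PySem.List.pyGet? cs i).getD ' '   -- Pre_ guarantees the index is in range
    if PySem.Set.contains seen c then i - start
    else helperALoop cs start rest (PySem.Set.add seen c)

def helper (start : Int) (s : String) : Int :=
  helperALoop s.toList start (PySem.List.pyRange start (s.toList.length : Int) 1) PySem.Set.empty

-- ===== PORT B =====
-- `j + 1 + t[j+1:].index(c)` of Source B, with j = t.index(c); Python raises if c is absent,
-- Source B's guard `count > 1` makes both index calls succeed, so the getD/none defaults are
-- unreachable under that guard (t[j+1:] with j+1 ≥ 0 is exactly List.drop (j+1)).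
def secondIdx (t : List Char) (c : Char) : Nat :=
  match PySem.List.index? t c with
  | some j => j + 1 + (PySem.List.index? (t.drop (j + 1)) c).getD 0
  | none => 0

-- the for-loop of Source B over set(t): best = min(best, second occurrence index); the result
-- is a minimum, hence independent of Python's set iteration order
def helperBLoop (t : List Char) : List Char → Int → Int
  | [], best => best
  | c :: rest, best =>
    helperBLoop t rest
      (if 1 < PySem.List.count t c then min best ((secondIdx t c : Nat) : Int) else best)

def helper_alt (start : Int) (s : String) : Int :=
  let t := (PySem.List.pyRange start (s.toList.length : Int) 1).map
      (fun i => (PySem.List.pyGet? s.toList i).getD ' ')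
  helperBLoop t (PySem.Set.ofList t) ((s.toList.length : Int) - start)

-- ===== PRECONDITION & SPEC =====
-- Pre_ excludes exactly the inputs where Python's A raises IndexError: start < -len(s)
-- (then s[start] is accessed with an out-of-range negative index).
def Pre_helper (start : Int) (s : String) : Prop := -(s.toList.length : Int) ≤ start
instance (start : Int) (s : String) : Decidable (Pre_helper start s) := by unfold Pre_helper; infer_instance
def pvWitness_helper : Int × String := (0, "abca")
def Spec_helper (start : Int) (s : String) (out : Int) : Prop := out = helper_alt start s
instance (start : Int) (s : String) (out : Int) : Decidable (Spec_helper start s out) := by unfold Spec_helper; infer_instance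

-- ===== CLAIM (what is proved, stated in full; the proofs are below) =====
def Claim_equal_helper : Prop := ∀ (start : Int) (s : String), Dom_helper start s → Pre_helper start s → Spec_helper start s (helper start s)

-- ===== LEMMAS AND PROOFS =====

-- the mathematical first-repeat position: smallest k with t[k] ∈ pre ++ t.take k, else t.length
def frAux (pre : List Char) : List Char → Nat
  | [] => 0
  | c :: rest => if c ∈ pre then 0 else frAux (pre ++ [c]) rest + 1

lemma frAux_le_length (t : List Char) : ∀ pre, frAux pre t ≤ t.length := by
  induction t with
  | nil => intro pre; simp [frAux]
  | cons c rest ih =>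
    intro pre
    simp only [frAux, List.length_cons]
    split_ifs with h
    · omega
    · have := ih (pre ++ [c]); omega

lemma frAux_ub (t : List Char) : ∀ (pre : List Char) (n : Nat) (c : Char),
    t[n]? = some c → (c ∈ pre ∨ c ∈ t.take n) → frAux pre t ≤ n := by
  induction t with
  | nil => intro pre n c h _; simp at h
  | cons d rest ih =>
    intro pre n c h hmem
    simp only [frAux]
    split_ifs with hd
    · omega
    · match n with
      | 0 =>
        have hdc : d = c := by simpa using h
        subst hdc
        rcases hmem with h1 | h1
        · exact absurd h1 hd
        · simp at h1
      | n + 1 =>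
        have h' : rest[n]? = some c := by simpa using h
        have hmem' : c ∈ pre ++ [d] ∨ c ∈ rest.take n := by
          rcases hmem with h1 | h1
          · exact Or.inl (by simp [h1])
          · simp only [List.take_succ_cons, List.mem_cons] at h1
            rcases h1 with rfl | h1
            · exact Or.inl (by simp)
            · exact Or.inr h1
        have := ih (pre ++ [d]) n c h' hmem'
        omega

lemma frAux_lb (t : List Char) : ∀ (pre : List Char), frAux pre t < t.length →
    ∃ c, t[frAux pre t]? = some c ∧ (c ∈ pre ∨ c ∈ t.take (frAux pre t)) := by
  induction t with
  | nil => intro pre h; simp [frAux] at h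
  | cons d rest ih =>
    intro pre h
    simp only [frAux] at h ⊢
    split_ifs at h ⊢ with hd
    · exact ⟨d, by simp, Or.inl hd⟩
    · have h' : frAux (pre ++ [d]) rest < rest.length := by
        simp only [List.length_cons] at h; omega
      obtain ⟨c, hc1, hc2⟩ := ih (pre ++ [d]) h'
      refine ⟨c, by simpa using hc1, ?_⟩
      rcases hc2 with h1 | h1
      · simp only [List.mem_append, List.mem_singleton] at h1
        rcases h1 with h1 | rfl
        · exact Or.inl h1
        · exact Or.inr (by simp)
      · exact Or.inr (by simp [List.take_succ_cons, h1])

-- a duplicate pattern at k: t[k] also occurs earlier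
def DupAt (t : List Char) (k : Nat) (c : Char) : Prop :=
  t[k]? = some c ∧ c ∈ t.take k

lemma mem_take_iff' (t : List Char) (n : Nat) (c : Char) :
    c ∈ t.take n ↔ ∃ m, m < n ∧ t[m]? = some c := by
  rw [List.mem_take_iff_getElem]
  constructor
  · rintro ⟨m, hm, rfl⟩
    exact ⟨m, by omega, by rw [List.getElem?_eq_getElem]⟩
  · rintro ⟨m, hm, hg⟩
    have hml : m < t.length := by
      by_contra hc
      rw [List.getElem?_eq_none (by omega)] at hg; simp at hg
    rw [List.getElem?_eq_getElem hml] at hg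
    exact ⟨m, by omega, Option.some_inj.mp hg⟩

lemma count_split (t : List Char) (k : Nat) (c : Char) :
    List.count c t = List.count c (t.take k) + List.count c (t.drop k) := by
  conv_lhs => rw [← List.take_append_drop k t]
  exact List.count_append

lemma count_gt_one_of_dupAt (t : List Char) (k : Nat) (c : Char)
    (h : DupAt t k c) : 1 < PySem.List.count t c := by
  obtain ⟨h1, h2⟩ := h
  rw [PySem.List.count_eq]
  have ht : 0 < List.count c (t.take k) := List.count_pos_iff.mpr h2
  have hd : 0 < List.count c (t.drop k) := by
    have hg : (t.drop k)[0]? = some c := by rw [List.getElem?_drop]; simpa using h1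
    exact List.count_pos_iff.mpr (List.mem_of_getElem? hg)
  have := count_split t k c
  omega

-- the second-occurrence index of Source B is a duplicate position, and the smallest one
lemma secondIdx_props (t : List Char) (c : Char) (h : 1 < PySem.List.count t c) :
    DupAt t (secondIdx t c) c ∧ ∀ k, DupAt t k c → secondIdx t c ≤ k := by
  have hct : c ∈ t := by
    rw [PySem.List.count_eq] at h
    exact List.count_pos_iff.mp (by omega)
  obtain ⟨j, hj⟩ : ∃ j, PySem.List.index? t c = some j :=
    Option.isSome_iff_exists.mp ((PySem.List.index?_isSome_iff t c).mpr hct)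
  obtain ⟨hjlen, hjc, hjmin⟩ := PySem.List.getElem_of_index?_eq_some hj
  have hnotin : c ∉ t.take j := by
    rw [mem_take_iff']
    rintro ⟨m, hm, hg⟩
    have hml : m < t.length := by omega
    rw [List.getElem?_eq_getElem hml] at hg
    exact hjmin m hm (Option.some_inj.mp hg)
  have hc1 : List.count c (t.take (j + 1)) = 1 := by
    have : t.take (j + 1) = t.take j ++ [c] := by
      rw [List.take_add_one, List.getElem?_eq_getElem hjlen, hjc]; rfl
    rw [this, List.count_append, List.count_eq_zero.mpr hnotin]
    simp
  have hdropmem : c ∈ t.drop (j + 1) := by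
    rw [PySem.List.count_eq] at h
    have := count_split t (j + 1) c
    exact List.count_pos_iff.mp (by omega)
  obtain ⟨p, hp⟩ : ∃ p, PySem.List.index? (t.drop (j + 1)) c = some p :=
    Option.isSome_iff_exists.mp ((PySem.List.index?_isSome_iff (t.drop (j + 1)) c).mpr hdropmem)
  obtain ⟨hplen, hpc, hpmin⟩ := PySem.List.getElem_of_index?_eq_some hp
  have hsecond : secondIdx t c = j + 1 + p := by
    simp only [secondIdx, hj, hp, Option.getD_some]
  constructor
  · constructor
    · rw [hsecond, show j + 1 + p = (j + 1) + p from rfl, ← List.getElem?_drop,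
        List.getElem?_eq_getElem hplen, hpc]
    · rw [hsecond, mem_take_iff']
      exact ⟨j, by omega, by rw [List.getElem?_eq_getElem hjlen, hjc]⟩
  · rintro k ⟨hk1, hk2⟩
    obtain ⟨m, hmk, hmg⟩ := (mem_take_iff' t k c).mp hk2
    have hklen : k < t.length := by
      by_contra hc
      rw [List.getElem?_eq_none (by omega)] at hk1; simp at hk1
    have hmlen : m < t.length := by omega
    rw [List.getElem?_eq_getElem hmlen] at hmg
    have hjm : j ≤ m := by
      by_contra hc
      exact hjmin m (by omega) (Option.some_inj.mp hmg)
    have hjk : j + 1 ≤ k := by omega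
    have hkdrop : (t.drop (j + 1))[k - (j + 1)]? = some c := by
      rw [List.getElem?_drop, show (j + 1) + (k - (j + 1)) = k from by omega]
      exact hk1
    have hdlen : k - (j + 1) < (t.drop (j + 1)).length := by
      by_contra hc
      rw [List.getElem?_eq_none (by omega)] at hkdrop; simp at hkdrop
    have hpk : p ≤ k - (j + 1) := by
      by_contra hc
      rw [List.getElem?_eq_getElem hdlen] at hkdrop
      exact hpmin (k - (j + 1)) (by omega) (Option.some_inj.mp hkdrop)
    omega

-- membership in an updated set, as a Bool equation
lemma contains_add_eq (s : PySem.Set Char) (x c : Char) :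
    PySem.Set.contains (PySem.Set.add s x) c = (PySem.Set.contains s c || x == c) := by
  rw [Bool.eq_iff_iff]
  simp only [Bool.or_eq_true, PySem.Set.contains_iff, PySem.Set.mem_add, beq_iff_eq]
  tauto

-- foldl-min facts about B's loop
lemma bLoop_le_init (t l : List Char) : ∀ (best : Int),
    helperBLoop t l best ≤ best := by
  induction l with
  | nil => intro best; simp [helperBLoop]
  | cons c rest ih =>
    intro best
    simp only [helperBLoop]
    split_ifs with h
    · exact le_trans (ih _) (min_le_left _ _)
    · exact ih _

lemma bLoop_le_mem (t l : List Char) : ∀ (best : Int) (c : Char),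
    c ∈ l → 1 < PySem.List.count t c →
    helperBLoop t l best ≤ ((secondIdx t c : Nat) : Int) := by
  induction l with
  | nil => intro _ _ h _; simp at h
  | cons d rest ih =>
    intro best c hc hcount
    simp only [List.mem_cons] at hc
    simp only [helperBLoop]
    rcases hc with rfl | hc
    · simp only [hcount, if_true]
      exact le_trans (bLoop_le_init t rest _) (min_le_right _ _)
    · exact ih _ c hc hcount

lemma bLoop_ge (t : List Char) (v : Int) (l : List Char) : ∀ (best : Int),
    (∀ c ∈ l, 1 < PySem.List.count t c → v ≤ ((secondIdx t c : Nat) : Int)) →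
    v ≤ best → v ≤ helperBLoop t l best := by
  induction l with
  | nil => intro best _ h; simpa [helperBLoop] using h
  | cons c rest ih =>
    intro best hall hb
    simp only [helperBLoop]
    split_ifs with h
    · exact ih _ (fun d hd => hall d (by simp [hd])) (le_min hb (hall c (by simp) h))
    · exact ih _ (fun d hd => hall d (by simp [hd])) hb

-- B's loop over any list with t's membership computes the first-repeat position
lemma bLoop_eq_fr (t : List Char) (D : List Char) (hD : ∀ c, c ∈ D ↔ c ∈ t) :
    helperBLoop t D ((t.length : Nat) : Int) = ((frAux [] t : Nat) : Int) := by
  apply le_antisymm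
  · by_cases hfr : frAux [] t < t.length
    · obtain ⟨c, hc1, hc2⟩ := frAux_lb t [] hfr
      have hdup : DupAt t (frAux [] t) c := ⟨hc1, by simpa using hc2.resolve_left (by simp)⟩
      have hcount := count_gt_one_of_dupAt t _ c hdup
      have hmem : c ∈ D := (hD c).mpr (List.mem_of_getElem? hc1)
      calc helperBLoop t D ((t.length : Nat) : Int)
          ≤ ((secondIdx t c : Nat) : Int) := bLoop_le_mem t D _ c hmem hcount
        _ ≤ ((frAux [] t : Nat) : Int) := by
            exact_mod_cast (secondIdx_props t c hcount).2 _ hdup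
    · have h1 : frAux [] t = t.length := le_antisymm (frAux_le_length t []) (by omega)
      rw [h1]
      exact bLoop_le_init t D _
  · apply bLoop_ge
    · intro c _ hcount
      have hdup := (secondIdx_props t c hcount).1
      exact_mod_cast frAux_ub t [] _ c hdup.1 (Or.inr hdup.2)
    · exact_mod_cast frAux_le_length t []

-- A's loop computes the same first-repeat position (invariant: seen = membership in pre)
lemma aLoop_eq_fr (cs : List Char) (start : Int) (n : Nat) :
    ∀ (i : Int) (seen : PySem.Set Char) (pre : List Char),
    ((cs.length : Int) - i).toNat = n → i ≤ (cs.length : Int) →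
    (∀ c, PySem.Set.contains seen c = decide (c ∈ pre)) →
    helperALoop cs start (PySem.List.pyRange i (cs.length : Int) 1) seen
      = (i - start) + ((frAux pre ((PySem.List.pyRange i (cs.length : Int) 1).map
          (fun k => (PySem.List.pyGet? cs k).getD ' ')) : Nat) : Int) := by
  induction n with
  | zero =>
    intro i seen pre hn hle _
    have hi : i = (cs.length : Int) := by omega
    rw [hi, PySem.List.pyRange_one_eq_nil le_rfl]
    simp [helperALoop, frAux]
  | succ n ih =>
    intro i seen pre hn hle hseen
    have hlt : i < (cs.length : Int) := by omega
    rw [PySem.List.pyRange_one_cons hlt]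
    simp only [List.map_cons, helperALoop, frAux]
    rw [hseen ((PySem.List.pyGet? cs i).getD ' ')]
    by_cases hmem : (PySem.List.pyGet? cs i).getD ' ' ∈ pre
    · simp only [hmem, decide_true, if_true, Nat.cast_zero, add_zero]
    · simp only [hmem, decide_false, if_false, Nat.cast_add, Nat.cast_one]
      rw [ih (i + 1) _ (pre ++ [(PySem.List.pyGet? cs i).getD ' ']) (by omega) (by omega)]
      · push_cast
        ring
      · intro c
        rw [contains_add_eq, hseen c, Bool.eq_iff_iff]
        simp only [Bool.or_eq_true, decide_eq_true_eq, beq_iff_eq, List.mem_append,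
          List.mem_singleton]
        tauto

-- ===== VERDICT (by name: the statement is the Claim_ definition above) =====
theorem helper_spec : Claim_equal_helper := by
  intro start s _ _
  show helper start s = helper_alt start s
  unfold helper helper_alt
  by_cases hcase : start ≤ (s.toList.length : Int)
  · have hA := aLoop_eq_fr s.toList start (((s.toList.length : Int) - start).toNat) start
      PySem.Set.empty [] rfl hcase (by intro c; simp [PySem.Set.empty, PySem.Set.contains])
    rw [hA]
    set t := (PySem.List.pyRange start (s.toList.length : Int) 1).map
        (fun i => (PySem.List.pyGet? s.toList i).getD ' ') with ht
    have hlen : ((t.length : Nat) : Int) = (s.toList.length : Int) - start := by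
      rw [ht, List.length_map, PySem.List.length_pyRange_one]; omega
    have hB := bLoop_eq_fr t (PySem.Set.ofList t) (fun c => PySem.Set.mem_ofList t c)
    rw [← hlen, hB]
    omega
  · rw [PySem.List.pyRange_one_eq_nil (by omega)]
    simp [helperALoop, helperBLoop, PySem.Set.ofList]
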